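-- pv_equiv track=rewrite | github.com/devyuseon/problem-solving | programmers/행렬과연산.py | solution
-- ===== SOURCE A (Python) =====
-- from collections import deque
--
-- def solution(rc, operations):
--     left = deque([r[0] for r in rc])
--     mid = deque([deque(r[1:-1]) for r in rc])
--     right = deque([r[-1] for r in rc])
--
--     def shiftrow():
--         left.appendleft(left.pop())
--         mid.appendleft(mid.pop())
--         right.appendleft(right.pop())
--
--     def rotate():
--         mid[0].appendleft(left.popleft())
--         right.appendleft(mid[0].pop())
--         mid[-1].append(right.pop())
--         left.append(mid[-1].popleft())
--
--     for op in operations: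
--         if op == "ShiftRow":
--             shiftrow()
--         else:
--             rotate()
--
--     return [[left[i]] + list(mid[i]) + [right[i]] for i in range(len(rc))]
-- ===== SOURCE B (Python) =====
-- def solution(rc, operations):
--     # Functional rewrite per operation on the matrix as a list of rows.
--     m = [list(r) for r in rc]
--     for op in operations:
--         if op == "ShiftRow":
--             # last row cycles to the top
--             m = m[-1:] + m[:-1]
--         else:
--             # the border ring turns clockwise by one cell:
--             # the top row shifts right (fed from the left column),
--             # the bottom row shifts left (fed from the right column),
--             # every other row passes its end cells up/down its columns
--             top = [m[1][0]] + m[0][:-1]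
--             bot = m[-1][1:] + [m[-2][-1]]
--             mids = [[nxt[0]] + cur[1:-1] + [prv[-1]]
--                     for prv, cur, nxt in zip(m, m[1:], m[2:])]
--             m = [top] + mids + [bot]
--     return m
-- ===== Notes on version B (the rewrite author's own statement) =====
-- stated objective: simpler
-- what changed: A simulates three column deques (left column, middle slices, right column) mutated per operation and reassembles rows at the end; B keeps the matrix as a plain list of rows and applies each operation as a whole-matrix functional rewrite (ShiftRow is m[-1:]+m[:-1], Rotate rewrites top row, bottom row and a zip over adjacent row triples). …
-- outside the precondition, e.g. on solution([[1]], []): A returns [[1, 1]], B returns [[1]]; on solution([[1, 2, 3]], ['Rotate']): A returns [[1, 3, 2]], B raises IndexError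
import Mathlib
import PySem

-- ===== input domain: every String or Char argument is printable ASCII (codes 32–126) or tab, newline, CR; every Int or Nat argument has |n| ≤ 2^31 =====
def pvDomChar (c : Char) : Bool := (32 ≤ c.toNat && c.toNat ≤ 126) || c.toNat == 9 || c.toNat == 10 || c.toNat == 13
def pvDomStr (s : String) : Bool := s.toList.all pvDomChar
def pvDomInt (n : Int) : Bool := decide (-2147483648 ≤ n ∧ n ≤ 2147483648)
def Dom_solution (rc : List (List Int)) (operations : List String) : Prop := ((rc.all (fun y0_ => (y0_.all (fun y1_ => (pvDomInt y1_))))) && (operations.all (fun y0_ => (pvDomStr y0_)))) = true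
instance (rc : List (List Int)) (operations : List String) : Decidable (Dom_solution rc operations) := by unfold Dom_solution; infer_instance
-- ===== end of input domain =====

-- B replaces A's three mutated column deques by whole-matrix functional rewrites (ShiftRow as a row rotation, Rotate as a border-ring rewrite of top row, bottom row and a zip over adjacent row triples): simpler, not faster.


-- ===== PORT A =====
-- deque d: d.appendleft(d.pop()) — IndexError on the empty deque is excluded by Pre_ (the default branch keeps the list)
def pvPopPush {α : Type} (xs : List α) : List α :=
  match xs.getLast? with
  | none => xs
  | some x => x :: xs.dropLast

-- the inner 'shiftrow': each of the three deques moves its last element to the front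
def pvShiftrowA (s : List Int × List (List Int) × List Int) : List Int × List (List Int) × List Int :=
  (pvPopPush s.1, pvPopPush s.2.1, pvPopPush s.2.2)

-- the inner 'rotate': the four sequential deque moves; the empty-deque defaults are never
-- reached inside Pre_ (rc nonempty when an operation runs, so left/right/mid[0]/mid[-1] are nonempty)
def pvRotateA (s : List Int × List (List Int) × List Int) : List Int × List (List Int) × List Int :=
  let l := s.1; let m := s.2.1; let r := s.2.2
  -- mid[0].appendleft(left.popleft())
  let x := l.headD 0
  let l := l.tail
  let m := match m with | [] => [] | m0 :: ms => (x :: m0) :: ms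
  -- right.appendleft(mid[0].pop())
  let y := (m.headD []).getLastD 0
  let m := match m with | [] => [] | m0 :: ms => m0.dropLast :: ms
  let r := y :: r
  -- mid[-1].append(right.pop())
  let z := r.getLastD 0
  let r := r.dropLast
  let m := m.dropLast ++ [m.getLastD [] ++ [z]]
  -- left.append(mid[-1].popleft())
  let w := (m.getLastD []).headD 0
  let m := m.dropLast ++ [(m.getLastD []).tail]
  let l := l ++ [w]
  (l, m, r)

def solution (rc : List (List Int)) (operations : List String) : List (List Int) :=
  -- left = [r[0] for r in rc]; mid = [r[1:-1] for r in rc]; right = [r[-1] for r in rc]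
  -- (r[0]/r[-1] raise IndexError on an empty row: excluded by Pre_)
  let left := rc.map (fun r => PySem.List.pyGetD r 0 0)
  let mid := rc.map (fun r => PySem.List.slice r (some 1) (some (-1)))
  let right := rc.map (fun r => PySem.List.pyGetD r (-1) 0)
  let s := operations.foldl
    (fun s op => if op == "ShiftRow" then pvShiftrowA s else pvRotateA s)
    (left, mid, right)
  (List.range rc.length).map
    (fun (i : Nat) => PySem.List.pyGetD s.1 (i : Int) 0 ::
              PySem.List.pyGetD s.2.1 (i : Int) [] ++ [PySem.List.pyGetD s.2.2 (i : Int) 0])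

-- ===== PORT B =====
-- [… for prv, cur, nxt in zip(m, m[1:], m[2:])]
def pvZip3 {α β γ δ : Type} (f : α → β → γ → δ) : List α → List β → List γ → List δ
  | a :: as, b :: bs, c :: cs => f a b c :: pvZip3 f as bs cs
  | _, _, _ => []

-- the Rotate branch of B (m[1][0] raises IndexError on a single-row matrix: excluded by Pre_,
-- the pyGetD default [] is never reached inside Pre_)
def pvRotB (m : List (List Int)) : List (List Int) :=
  let top := PySem.List.pyGetD (PySem.List.pyGetD m 1 []) 0 0 ::
             PySem.List.slice (PySem.List.pyGetD m 0 []) none (some (-1))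
  let bot := PySem.List.slice (PySem.List.pyGetD m (-1) []) (some 1) none ++
             [PySem.List.pyGetD (PySem.List.pyGetD m (-2) []) (-1) 0]
  let mids := pvZip3
    (fun prv cur nxt => PySem.List.pyGetD nxt 0 0 ::
      PySem.List.slice cur (some 1) (some (-1)) ++ [PySem.List.pyGetD prv (-1) 0])
    m (PySem.List.slice m (some 1) none) (PySem.List.slice m (some 2) none)
  top :: mids ++ [bot]

def solution_alt (rc : List (List Int)) (operations : List String) : List (List Int) :=
  operations.foldl
    (fun m op =>
      if op == "ShiftRow" then
        PySem.List.slice m (some (-1)) none ++ PySem.List.slice m none (some (-1))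
      else pvRotB m)
    (rc.map (fun r => r))

-- ===== PRECONDITION & SPEC =====
-- Pre_ excludes the inputs where either program raises IndexError (an empty matrix with an
-- operation for A; a single-row matrix under Rotate for B) and the degenerate matrices with a
-- row shorter than 2, where a border rotation is unspecified and A's returned values come from
-- its accidental column decomposition (the lone element sits in both border columns at once).
def Pre_solution (rc : List (List Int)) (operations : List String) : Prop :=
  (∀ r ∈ rc, 2 ≤ r.length) ∧ (rc = [] → operations = []) ∧
    (rc.length = 1 → ∀ op ∈ operations, op = "ShiftRow")
instance (rc : List (List Int)) (operations : List String) : Decidable (Pre_solution rc operations) := by unfold Pre_solution; infer_instance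

def pvWitness_solution : List (List Int) × List String :=
  ([[1, 2, 3], [4, 5, 6], [7, 8, 9]], ["ShiftRow", "Rotate", "Rotate"])

def Spec_solution (rc : List (List Int)) (operations : List String) (out : List (List Int)) : Prop := out = solution_alt rc operations
instance (rc : List (List Int)) (operations : List String) (out : List (List Int)) : Decidable (Spec_solution rc operations out) := by unfold Spec_solution; infer_instance

-- ===== CLAIM (what is proved, stated in full; the proofs are below) =====
def Claim_equal_solution : Prop := ∀ (rc : List (List Int)) (operations : List String), Dom_solution rc operations → Pre_solution rc operations → Spec_solution rc operations (solution rc operations)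

-- ===== LEMMAS AND PROOFS =====

-- the three column projections of a matrix (A's deque state as a function of B's matrix)
def pvFirsts (M : List (List Int)) : List Int := M.map (fun r => r.headD 0)
def pvMids (M : List (List Int)) : List (List Int) := M.map (fun r => r.tail.dropLast)
def pvLasts (M : List (List Int)) : List Int := M.map (fun r => r.getLastD 0)
def pvDecomp (M : List (List Int)) : List Int × List (List Int) × List Int :=
  (pvFirsts M, pvMids M, pvLasts M)
def pvGood (M : List (List Int)) : Prop := ∀ r ∈ M, 2 ≤ r.length

-- bridges from the PySem primitives to structural list operations
theorem pvGetD_zero' {α : Type} (xs : List α) (d : α) : PySem.List.pyGetD xs 0 d = xs.headD d := by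
  rw [PySem.List.pyGetD_zero]; cases xs <;> simp

theorem pvGetD_one {α : Type} (xs : List α) (d : α) : PySem.List.pyGetD xs 1 d = xs.tail.headD d := by
  cases xs with
  | nil => simp [PySem.List.pyGetD, PySem.List.pyGet?]
  | cons a t => cases t <;> simp [PySem.List.pyGetD, PySem.List.pyGet?, PySem.List.pyIdx?]

theorem pvGetD_neg_one' {α : Type} (xs : List α) (d : α) : PySem.List.pyGetD xs (-1) d = xs.getLastD d := by
  cases xs with
  | nil => simp [PySem.List.pyGetD, PySem.List.pyGet?]
  | cons a t =>
    rw [PySem.List.pyGetD, PySem.List.pyGet?_neg_one]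
    simp [List.getLastD_eq_getLast?]

theorem pvGetD_neg_two {α : Type} (xs : List α) (d : α) :
    PySem.List.pyGetD xs (-2) d = xs.dropLast.getLastD d := by
  rcases Nat.lt_or_ge xs.length 2 with h | h
  · match xs, h with
    | [], _ => simp [PySem.List.pyGetD, PySem.List.pyGet?]
    | [a], _ => simp [PySem.List.pyGetD, PySem.List.pyGet?, PySem.List.pyIdx?]
  · rw [PySem.List.pyGetD, PySem.List.pyGet?_neg_ofNat xs 2 (by norm_num) h]
    have h1 : xs.length - 2 < xs.length := by omega
    rw [List.getElem?_eq_getElem h1]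
    simp [List.getLastD_eq_getLast?, List.getLast?_eq_getElem?]
    rw [List.getElem?_eq_getElem (by simp [List.length_dropLast]; omega)]
    simp [List.getElem_dropLast, show xs.length - 2 = xs.length - 1 - 1 from by omega]

theorem pvSlice_one_neg_one {α : Type} (xs : List α) :
    PySem.List.slice xs (some 1) (some (-1)) = xs.tail.dropLast := by
  cases xs with
  | nil => simp [PySem.List.slice]
  | cons a t => simp [PySem.List.slice, ← List.dropLast_eq_take]

theorem pvSlice_two_none {α : Type} (xs : List α) :
    PySem.List.slice xs (some 2) none = xs.drop 2 := by
  rw [show ((2:Int)) = ((2:Nat):Int) by norm_num, PySem.List.slice_from_natCast]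

-- small structural list facts
theorem pvGetLastD_eq_getLast {α : Type} (q : List α) (d : α) (h : q ≠ []) :
    q.getLastD d = q.getLast h := by
  rw [List.getLastD_eq_getLast?, List.getLast?_eq_some_getLast h]; rfl

theorem pvGetLastD_cons_ne {α : Type} (c : α) (q : List α) (d e : α) (h : q ≠ []) :
    (c :: q).getLastD d = q.getLastD e := by
  rw [List.getLastD_cons, pvGetLastD_eq_getLast q c h, pvGetLastD_eq_getLast q e h]

theorem pvHeadD_append {α : Type} (xs ys : List α) (d : α) (h : xs ≠ []) :
    (xs ++ ys).headD d = xs.headD d := by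
  cases xs with
  | nil => exact absurd rfl h
  | cons a t => simp

theorem pvDropLast_getLastD {α : Type} (xs : List α) (d : α) (h : xs ≠ []) :
    xs.dropLast ++ [xs.getLastD d] = xs := by
  rcases xs.eq_nil_or_concat with rfl | ⟨ys, a, rfl⟩
  · exact absurd rfl h
  · simp

theorem pvTail_reassemble (r : List Int) (h : 2 ≤ r.length) :
    r.tail.dropLast ++ [r.getLastD 0] = r.tail := by
  cases r with
  | nil => simp at h
  | cons c q =>
    have hq : q ≠ [] := by intro hq; subst hq; simp at h
    rw [pvGetLastD_cons_ne c q 0 0 hq]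
    exact pvDropLast_getLastD q 0 hq

theorem pvConsHeadD_map {α β : Type} (L : List (List α)) (F : List α → β) (h : L ≠ []) :
    F (L.headD []) :: L.tail.map F = L.map F := by
  cases L with
  | nil => exact absurd rfl h
  | cons a t => simp

theorem pvDropLastMap_getLastD {α β : Type} (L : List (List α)) (F : List α → β) (h : L ≠ []) :
    L.dropLast.map F ++ [F (L.getLastD [])] = L.map F := by
  rcases L.eq_nil_or_concat with rfl | ⟨ys, a, rfl⟩
  · exact absurd rfl h
  · simp

theorem pvDropLast_cons_ne {α : Type} (a : α) (t : List α) (h : t ≠ []) :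
    (a :: t).dropLast = a :: t.dropLast := by
  cases t with
  | nil => exact absurd rfl h
  | cons b s => rfl

-- pvZip3 projection lemmas
theorem pvZip3_map {α β γ δ ε : Type} (f : α → β → γ → δ) (F : δ → ε) :
    ∀ (as : List α) (bs : List β) (cs : List γ),
      (pvZip3 f as bs cs).map F = pvZip3 (fun a b c => F (f a b c)) as bs cs := by
  intro as
  induction as with
  | nil => intro bs cs; cases bs <;> cases cs <;> simp [pvZip3]
  | cons a as ih => intro bs cs; cases bs <;> cases cs <;> simp [pvZip3, ih]

theorem pvZip3_first {α β γ ε : Type} (F : α → ε) :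
    ∀ (as : List α) (bs : List β) (cs : List γ),
      pvZip3 (fun a _ _ => F a) as bs cs = (as.take (min bs.length cs.length)).map F := by
  intro as
  induction as with
  | nil => intro bs cs; cases bs <;> cases cs <;> simp [pvZip3]
  | cons a as ih =>
    intro bs cs
    cases bs <;> cases cs <;> simp [pvZip3, ih, Nat.succ_min_succ]

theorem pvZip3_second {α β γ ε : Type} (F : β → ε) :
    ∀ (as : List α) (bs : List β) (cs : List γ),
      pvZip3 (fun _ b _ => F b) as bs cs = (bs.take (min as.length cs.length)).map F := by
  intro as
  induction as with
  | nil => intro bs cs; cases bs <;> cases cs <;> simp [pvZip3]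
  | cons a as ih =>
    intro bs cs
    cases bs <;> cases cs <;> simp [pvZip3, ih, Nat.succ_min_succ]

theorem pvZip3_third {α β γ ε : Type} (F : γ → ε) :
    ∀ (as : List α) (bs : List β) (cs : List γ),
      pvZip3 (fun _ _ c => F c) as bs cs = (cs.take (min as.length bs.length)).map F := by
  intro as
  induction as with
  | nil => intro bs cs; cases bs <;> cases cs <;> simp [pvZip3]
  | cons a as ih =>
    intro bs cs
    cases bs <;> cases cs <;> simp [pvZip3, ih, Nat.succ_min_succ]

theorem pvZip3_mem {α β γ δ : Type} (f : α → β → γ → δ) :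
    ∀ (as : List α) (bs : List β) (cs : List γ) (x : δ),
      x ∈ pvZip3 f as bs cs → ∃ a ∈ as, ∃ b ∈ bs, ∃ c ∈ cs, x = f a b c := by
  intro as
  induction as with
  | nil => intro bs cs x hx; cases bs <;> cases cs <;> simp [pvZip3] at hx
  | cons a as ih =>
    intro bs cs x hx
    cases bs with
    | nil => simp [pvZip3] at hx
    | cons b bs =>
      cases cs with
      | nil => simp [pvZip3] at hx
      | cons c cs =>
        simp only [pvZip3, List.mem_cons] at hx
        rcases hx with rfl | hx
        · exact ⟨a, by simp, b, by simp, c, by simp, rfl⟩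
        · obtain ⟨a', ha, b', hb, c', hc, rfl⟩ := ih bs cs x hx
          exact ⟨a', by simp [ha], b', by simp [hb], c', by simp [hc], rfl⟩

-- ShiftRow agreement, length preservation and row preservation
theorem pvShift_decomp (M : List (List Int)) :
    pvShiftrowA (pvDecomp M)
      = pvDecomp (PySem.List.slice M (some (-1)) none ++ PySem.List.slice M none (some (-1)))
    ∧ (PySem.List.slice M (some (-1)) none ++ PySem.List.slice M none (some (-1))).length = M.length
    ∧ (pvGood M → pvGood (PySem.List.slice M (some (-1)) none ++ PySem.List.slice M none (some (-1)))) := by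
  rcases M.eq_nil_or_concat with rfl | ⟨ms, mk, hMc⟩
  · refine ⟨?_, ?_, ?_⟩
    · simp [pvShiftrowA, pvDecomp, pvFirsts, pvMids, pvLasts, pvPopPush, PySem.List.slice]
    · simp [PySem.List.slice]
    · intro _ r hr
      simp [PySem.List.slice] at hr
  · rw [List.concat_eq_append] at hMc
    subst hMc
    have h1 : PySem.List.slice (ms ++ [mk]) (some (-1)) none = [mk] := by
      rw [PySem.List.slice_from_neg_one]
      simp
    have h2 : PySem.List.slice (ms ++ [mk]) none (some (-1)) = ms := by
      rw [PySem.List.slice_to_neg_one]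
      simp
    rw [h1, h2]
    refine ⟨?_, by simp, ?_⟩
    · simp [pvShiftrowA, pvDecomp, pvFirsts, pvMids, pvLasts, pvPopPush,
        List.map_append]
    · intro hG r hr
      apply hG
      rcases List.mem_cons.mp hr with rfl | h
      · simp
      · exact List.mem_append_left _ h

-- miscellaneous row-shape facts used by the Rotate case
theorem pvTail_ne_nil (r : List Int) (h : 2 ≤ r.length) : r.tail ≠ [] := by
  cases r with
  | nil => simp at h
  | cons a t =>
    cases t with
    | nil => simp at h
    | cons b s => simp

theorem pvAppend_singleton_tail_dropLast {α : Type} (q : List α) (v : α) (h : q ≠ []) :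
    (q ++ [v]).tail.dropLast = q.tail := by
  cases q with
  | nil => exact absurd rfl h
  | cons c q' => simp

theorem pvA0_eq (m0 : List Int) (h : 2 ≤ m0.length) :
    (m0.headD 0 :: m0.tail.dropLast).dropLast = m0.dropLast.dropLast := by
  cases m0 with
  | nil => simp at h
  | cons a t =>
    have ht : t ≠ [] := by intro he; subst he; simp at h
    rw [List.headD_cons, List.tail_cons, pvDropLast_cons_ne a t ht]

theorem pvY_eq (m0 : List Int) (h : 2 ≤ m0.length) (x : Int) :
    (x :: m0.dropLast).getLastD 0 = (m0.headD 0 :: m0.tail.dropLast).getLastD 0 := by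
  cases m0 with
  | nil => simp at h
  | cons a t =>
    have ht : t ≠ [] := by intro he; subst he; simp at h
    rw [List.headD_cons, List.tail_cons, pvDropLast_cons_ne a t ht,
      List.getLastD_cons, List.getLastD_cons]
    rw [List.getLastD_cons]

theorem pvDL1 {α : Type} (x z : α) (X : List α) : (x :: (X ++ [z])).dropLast = x :: X := by
  rw [show x :: (X ++ [z]) = (x :: X) ++ [z] from by simp, List.dropLast_concat]

theorem pvDL2 {α : Type} (x y z : α) (X : List α) :
    (x :: y :: (X ++ [z])).dropLast = x :: y :: X := by
  rw [show x :: y :: (X ++ [z]) = (x :: y :: X) ++ [z] from by simp, List.dropLast_concat]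

theorem pvDrop_two {α : Type} (xs : List α) : xs.drop 2 = xs.tail.tail := by
  cases xs with
  | nil => rfl
  | cons a t => cases t <;> simp

-- pvRotB in structural form
theorem pvRotB_eq (M : List (List Int)) :
    pvRotB M =
      ((M.tail.headD []).headD 0 :: (M.headD []).dropLast)
      :: pvZip3 (fun prv cur nxt => nxt.headD 0 :: cur.tail.dropLast ++ [prv.getLastD 0])
           M M.tail M.tail.tail
      ++ [(M.getLastD []).tail ++ [(M.dropLast.getLastD []).getLastD 0]] := by
  unfold pvRotB
  simp only [pvGetD_one, pvGetD_zero', pvGetD_neg_one', pvGetD_neg_two,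
    PySem.List.slice_to_neg_one, PySem.List.slice_from_one, pvSlice_two_none,
    pvDrop_two, pvSlice_one_neg_one]

-- Rotate agreement, length preservation and row-shape preservation
theorem pvRot_decomp (M : List (List Int)) (hlen : 2 ≤ M.length) (hG : pvGood M) :
    pvRotateA (pvDecomp M) = pvDecomp (pvRotB M)
    ∧ (pvRotB M).length = M.length ∧ pvGood (pvRotB M) := by
  rcases M with _ | ⟨m0, T⟩
  · simp at hlen
  have hm0 : 2 ≤ m0.length := hG m0 (by simp)
  rcases T.eq_nil_or_concat with rfl | ⟨mm, mk, hc⟩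
  · simp at hlen
  rw [List.concat_eq_append] at hc
  subst hc
  have hmk : 2 ≤ mk.length := hG mk (by simp)
  rw [pvRotB_eq]
  have e_last : (m0 :: (mm ++ [mk])).getLastD [] = mk := by
    rw [show m0 :: (mm ++ [mk]) = (m0 :: mm) ++ [mk] from by simp, List.getLastD_concat]
  have e_dl : (m0 :: (mm ++ [mk])).dropLast = m0 :: mm := by
    rw [show m0 :: (mm ++ [mk]) = (m0 :: mm) ++ [mk] from by simp, List.dropLast_concat]
  rw [e_last, e_dl]
  simp only [List.tail_cons, List.headD_cons]
  have hTt : mk.tail ≠ [] := pvTail_ne_nil mk hmk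
  have hzf : (pvZip3 (fun prv cur nxt => nxt.headD 0 :: (cur.tail.dropLast ++ [prv.getLastD 0]))
      (m0 :: (mm ++ [mk])) (mm ++ [mk]) ((mm ++ [mk]).tail)).map (fun r => r.headD 0)
      = ((mm ++ [mk]).tail).map (fun r => r.headD 0) := by
    simp only [pvZip3_map, List.headD_cons]
    rw [pvZip3_third (fun (c : List Int) => c.headD 0)]
    rw [List.take_of_length_le (by simp)]
  have hzg : (pvZip3 (fun prv cur nxt => nxt.headD 0 :: (cur.tail.dropLast ++ [prv.getLastD 0]))
      (m0 :: (mm ++ [mk])) (mm ++ [mk]) ((mm ++ [mk]).tail)).map (fun r => r.tail.dropLast)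
      = mm.map (fun r => r.tail.dropLast) := by
    simp only [pvZip3_map, List.tail_cons, List.dropLast_concat]
    rw [pvZip3_second (fun (b : List Int) => b.tail.dropLast)]
    rw [show min (m0 :: (mm ++ [mk])).length ((mm ++ [mk]).tail).length = mm.length from by
      simp only [List.length_cons, List.length_append, List.length_tail,
        List.length_nil]
      omega]
    rw [List.take_left]
  have hzh : (pvZip3 (fun prv cur nxt => nxt.headD 0 :: (cur.tail.dropLast ++ [prv.getLastD 0]))
      (m0 :: (mm ++ [mk])) (mm ++ [mk]) ((mm ++ [mk]).tail)).map (fun r => r.getLastD 0)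
      = ((m0 :: mm).dropLast).map (fun r => r.getLastD 0) := by
    simp only [pvZip3_map, List.getLastD_cons, List.getLastD_concat]
    rw [pvZip3_first (fun (r : List Int) => r.getLastD 0)]
    rw [show min (mm ++ [mk]).length ((mm ++ [mk]).tail).length = mm.length from by
      simp only [List.length_cons, List.length_append, List.length_tail,
        List.length_nil]
      omega]
    rw [show m0 :: (mm ++ [mk]) = (m0 :: mm) ++ [mk] from by simp,
      List.take_append_of_le_length (by simp), List.dropLast_eq_take]
    simp
  have hzlen : (pvZip3 (fun prv cur nxt => nxt.headD 0 :: (cur.tail.dropLast ++ [prv.getLastD 0]))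
      (m0 :: (mm ++ [mk])) (mm ++ [mk]) ((mm ++ [mk]).tail)).length = mm.length := by
    have h := congrArg List.length hzg
    simpa using h
  have hre : mk.tail.dropLast ++ [mk.getLastD 0] = mk.tail := pvTail_reassemble mk hmk
  have hfbot : (mk.tail ++ [((m0 :: mm).getLastD []).getLastD 0]).headD 0 = mk.tail.headD 0 :=
    pvHeadD_append _ _ _ hTt
  have hgbot : (mk.tail ++ [((m0 :: mm).getLastD []).getLastD 0]).tail.dropLast = mk.tail.tail :=
    pvAppend_singleton_tail_dropLast _ _ hTt
  have hcons2 : ((mm ++ [mk]).headD []).headD 0 ::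
        (((mm ++ [mk]).tail).map (fun r => r.headD 0) ++ [mk.tail.headD 0])
      = mm.map (fun r => r.headD 0) ++ [mk.headD 0, mk.tail.headD 0] := by
    rw [← List.cons_append, pvConsHeadD_map (mm ++ [mk]) (fun r => r.headD 0) (by simp)]
    simp
  have hthird : ((m0 :: mm).dropLast).map (fun r => r.getLastD 0)
        ++ [((m0 :: mm).getLastD []).getLastD 0]
      = (m0 :: mm).map (fun r => r.getLastD 0) :=
    pvDropLastMap_getLastD (m0 :: mm) (fun r => r.getLastD 0) (by simp)
  simp only [List.getLastD_cons] at hfbot hgbot hthird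
  refine ⟨?_, ?_, ?_⟩
  · simp only [pvDecomp, pvFirsts, pvMids, pvLasts, pvRotateA, List.map_cons,
      List.map_append, List.map_nil, List.headD_cons, List.tail_cons,
      pvDL1, pvDL2, List.getLastD_cons, List.getLastD_concat, hre,
      pvA0_eq m0 hm0, pvY_eq m0 hm0,
      List.append_assoc, List.cons_append, List.nil_append, Prod.mk.injEq]
    refine ⟨?_, ?_, ?_⟩
    · rw [hzf, hfbot, hcons2]
    · rw [hzg, hgbot]
    · rw [hzh, hthird]
      simp
  · simp only [List.cons_append, List.length_cons, List.length_append, hzlen,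
      List.length_nil]
  · intro r hr
    rcases List.mem_cons.mp hr with rfl | hr
    · simp only [List.length_cons, List.length_dropLast]
      omega
    rcases List.mem_append.mp hr with hr | hr
    · obtain ⟨a, ha, b, hb, c, hc, rfl⟩ := pvZip3_mem _ _ _ _ _ hr
      have hGb : 2 ≤ b.length := hG b (by
        rcases List.mem_append.mp hb with hb | hb
        · simp [hb]
        · simp at hb; simp [hb])
      simp only [List.length_cons, List.length_append, List.length_dropLast,
        List.length_tail, List.length_nil]
      omega
    · simp at hr
      subst hr
      simp only [List.length_append, List.length_tail, List.length_cons, List.length_nil]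
      omega

-- A's initial column deques are the decomposition of the (unchanged) matrix
theorem pvInit_decomp (rc : List (List Int)) :
    pvDecomp rc
      = (rc.map (fun r => PySem.List.pyGetD r 0 0),
         rc.map (fun r => PySem.List.slice r (some 1) (some (-1))),
         rc.map (fun r => PySem.List.pyGetD r (-1) 0)) := by
  unfold pvDecomp pvFirsts pvMids pvLasts
  simp only [Prod.mk.injEq]
  refine ⟨?_, ?_, ?_⟩ <;> apply List.map_congr_left <;> intro r _ <;>
    simp [pvGetD_zero', pvSlice_one_neg_one, pvGetD_neg_one']

theorem pvRow_reassemble (r : List Int) (h : 2 ≤ r.length) :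
    r.headD 0 :: r.tail.dropLast ++ [r.getLastD 0] = r := by
  cases r with
  | nil => simp at h
  | cons a t =>
    have ht : t ≠ [] := by intro he; subst he; simp at h
    rw [List.headD_cons, List.tail_cons, List.getLastD_cons, List.cons_append,
      pvDropLast_getLastD t a ht]

-- A's final reassembly reading the three columns reproduces B's matrix
theorem pvRecon (M : List (List Int)) (hG : pvGood M) :
    (List.range M.length).map
      (fun (i : Nat) => PySem.List.pyGetD (pvFirsts M) (i : Int) 0 ::
                PySem.List.pyGetD (pvMids M) (i : Int) [] ++ [PySem.List.pyGetD (pvLasts M) (i : Int) 0])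
      = M := by
  apply List.ext_getElem
  · simp
  · intro i h1 h2
    simp only [List.getElem_map, List.getElem_range]
    rw [PySem.List.pyGetD_natCast, PySem.List.pyGetD_natCast, PySem.List.pyGetD_natCast]
    have hi : i < M.length := by simpa using h1
    rw [List.getD_eq_getElem _ _ (by simpa [pvFirsts] using hi),
      List.getD_eq_getElem _ _ (by simpa [pvMids] using hi),
      List.getD_eq_getElem _ _ (by simpa [pvLasts] using hi)]
    unfold pvFirsts pvMids pvLasts
    simp only [List.getElem_map]
    exact pvRow_reassemble _ (hG M[i] (List.getElem_mem hi))

-- the loop invariant: A's deque state stays the decomposition of B's matrix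
theorem pvFold_inv (ops : List String) (M : List (List Int)) (hG : pvGood M)
    (H : 2 ≤ M.length ∨ ∀ op ∈ ops, op = "ShiftRow") :
    ops.foldl (fun s op => if op == "ShiftRow" then pvShiftrowA s else pvRotateA s) (pvDecomp M)
      = pvDecomp (ops.foldl (fun m op =>
          if op == "ShiftRow" then
            PySem.List.slice m (some (-1)) none ++ PySem.List.slice m none (some (-1))
          else pvRotB m) M)
    ∧ pvGood (ops.foldl (fun m op =>
          if op == "ShiftRow" then
            PySem.List.slice m (some (-1)) none ++ PySem.List.slice m none (some (-1))
          else pvRotB m) M)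
    ∧ (ops.foldl (fun m op =>
          if op == "ShiftRow" then
            PySem.List.slice m (some (-1)) none ++ PySem.List.slice m none (some (-1))
          else pvRotB m) M).length = M.length := by
  induction ops generalizing M with
  | nil => exact ⟨rfl, hG, rfl⟩
  | cons op ops ih =>
    simp only [List.foldl_cons]
    by_cases hop : (op == "ShiftRow") = true
    · rw [hop]
      simp only [if_true]
      obtain ⟨e1, e2, e3⟩ := pvShift_decomp M
      have H' : 2 ≤ (PySem.List.slice M (some (-1)) none ++ PySem.List.slice M none (some (-1))).length
          ∨ ∀ o ∈ ops, o = "ShiftRow" := by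
        rcases H with h | h
        · left; omega
        · right; intro o ho; exact h o (by simp [ho])
      obtain ⟨i1, i2, i3⟩ := ih _ (e3 hG) H'
      rw [e1]
      exact ⟨i1, i2, by rw [i3, e2]⟩
    · rw [Bool.not_eq_true] at hop
      rw [hop]
      simp only [Bool.false_eq_true, if_false]
      have hlen2 : 2 ≤ M.length := by
        rcases H with h | h
        · exact h
        · exfalso
          have := h op (by simp)
          subst this
          simp at hop
      obtain ⟨e1, e2, e3⟩ := pvRot_decomp M hlen2 hG
      obtain ⟨i1, i2, i3⟩ := ih _ e3 (Or.inl (by omega))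
      rw [e1]
      exact ⟨i1, i2, by rw [i3, e2]⟩

-- ===== VERDICT (by name: the statement is the Claim_ definition above) =====
theorem solution_spec : Claim_equal_solution := by
  intro rc ops _ hpre
  show solution rc ops = solution_alt rc ops
  obtain ⟨hrows, hemp, hone⟩ := hpre
  have H : 2 ≤ rc.length ∨ ∀ op ∈ ops, op = "ShiftRow" := by
    rcases rc with _ | ⟨r0, rs⟩
    · right
      intro op hop
      rw [hemp rfl] at hop
      simp at hop
    · rcases rs with _ | ⟨r1, rs'⟩
      · right
        exact hone rfl
      · left
        simp
  obtain ⟨f1, f3, f4⟩ := pvFold_inv ops rc hrows H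
  unfold solution solution_alt
  simp only [List.map_id_fun', id]
  rw [← pvInit_decomp rc, f1]
  simp only [pvDecomp]
  have hlen : rc.length
      = (ops.foldl (fun m op =>
          if op == "ShiftRow" then
            PySem.List.slice m (some (-1)) none ++ PySem.List.slice m none (some (-1))
          else pvRotB m) rc).length := f4.symm
  rw [hlen]
  exact pvRecon _ f3
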